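-- pv_equiv track=rewrite | github.com/chris-sanders/troubleshoot-mcp-server | src/mcp_server_troubleshoot/config.py | _extract_env_vars
-- ===== SOURCE A (Python) =====
-- from typing import Any, Dict, List, Optional, Union
--
-- def _extract_env_vars(args: List[str]) -> Dict[str, str]:
--     """Extract environment variables from the args list."""
--     env_vars = {}
--     try:
--         while True:
--             e_index = args.index("-e")
--             if e_index + 1 < len(args):
--                 env_var = args[e_index + 1]
--                 if "=" in env_var:
--                     key, value = env_var.split("=", 1)
--                     # Remove quotes if present
--                     if value.startswith('"') and value.endswith('"'):
--                         value = value[1:-1]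
--                     if value.startswith("'") and value.endswith("'"):
--                         value = value[1:-1]
--                     env_vars[key] = value
--                 args = args[e_index + 2 :]  # Continue search after this occurrence
--             else:
--                 break
--     except ValueError:
--         pass  # No more -e flags
--     return env_vars
-- ===== SOURCE B (Python) =====
-- from typing import Any, Dict, List, Optional, Union
--
-- def _strip_quotes(value: str) -> str:
--     if value.startswith('"') and value.endswith('"'):
--         value = value[1:-1]
--     if value.startswith("'") and value.endswith("'"):
--         value = value[1:-1]
--     return value
--
-- def _extract_env_vars(args: List[str]) -> Dict[str, str]:
--     """Extract environment variables from the args list (single left-to-right scan)."""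
--     env_vars = {}
--     i = 0
--     n = len(args)
--     while i < n:
--         if args[i] == "-e":
--             if i + 1 >= n:
--                 break
--             nxt = args[i + 1]
--             if "=" in nxt:
--                 key, value = nxt.split("=", 1)
--                 env_vars[key] = _strip_quotes(value)
--             i += 2
--         else:
--             i += 1
--     return env_vars
-- ===== Notes on version B (the rewrite author's own statement) =====
-- stated objective: alternative
-- what changed: A repeatedly calls list.index('-e') and re-slices the remaining list each round; B walks the list once with an explicit index, collecting key=value after each '-e' in a single pass.
import Mathlib
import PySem

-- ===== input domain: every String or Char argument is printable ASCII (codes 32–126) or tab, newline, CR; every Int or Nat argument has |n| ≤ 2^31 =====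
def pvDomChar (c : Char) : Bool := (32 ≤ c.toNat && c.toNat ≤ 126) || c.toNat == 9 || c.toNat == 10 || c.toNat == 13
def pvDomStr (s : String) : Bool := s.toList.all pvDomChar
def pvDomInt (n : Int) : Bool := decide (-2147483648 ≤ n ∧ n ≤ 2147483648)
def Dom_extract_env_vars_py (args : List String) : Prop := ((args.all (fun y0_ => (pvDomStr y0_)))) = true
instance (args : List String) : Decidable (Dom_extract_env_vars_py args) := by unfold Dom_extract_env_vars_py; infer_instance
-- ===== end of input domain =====

-- B replaces A's repeated `.index`-and-reslice passes by a single left-to-right scan of the list (objective: alternative traversal; return value only, A does not mutate its argument).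

-- ===== PORT A =====
-- A's while loop: each pass finds the first "-e" (list.index), processes the element after it,
-- and restarts the search on the slice after that pair; ValueError (no "-e" left) ends the loop.
-- args[e_index + 1] is in range because of the guard, so a plain getElem is exact;
-- "=" ∈ env_var guarantees split("=", 1) yields exactly two pieces, so the other match arms are unreachable.
def pvALoop (args : List String) (env : PySem.Dict String String) : PySem.Dict String String :=
  match PySem.List.index? args "-e" with
  | none => env
  | some e =>
    if he : e + 1 < args.length then
      let env_var := args[e + 1]'he
      let env :=
        if PySem.Str.isIn "=" env_var then
          match PySem.Str.splitMax? env_var "=" 1 with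
          | some (key :: value :: _) =>
            let value := if PySem.Str.startswith value "\"" && PySem.Str.endswith value "\"" then
                PySem.Str.slice value (some 1) (some (-1)) else value
            let value := if PySem.Str.startswith value "'" && PySem.Str.endswith value "'" then
                PySem.Str.slice value (some 1) (some (-1)) else value
            env.insert key value
          | _ => env
        else env
      pvALoop (PySem.List.slice args (some ((e : Int) + 2)) none) env
    else env
termination_by args.length
decreasing_by
  have h2 : PySem.List.slice args (some ((e : Int) + 2)) none = args.drop (e + 2) := by
    have := PySem.List.slice_from_natCast (xs := args) (a := e + 2)
    push_cast at this
    exact this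
  rw [h2]; simp only [List.length_drop]; omega

def extract_env_vars_py (args : List String) : List (String × String) :=
  (pvALoop args PySem.Dict.empty).items

-- ===== PORT B =====
def pvStripQuotes (value : String) : String :=
  let value := if PySem.Str.startswith value "\"" && PySem.Str.endswith value "\"" then
      PySem.Str.slice value (some 1) (some (-1)) else value
  if PySem.Str.startswith value "'" && PySem.Str.endswith value "'" then
    PySem.Str.slice value (some 1) (some (-1)) else value

-- B's while loop over the index i becomes the obvious structural recursion on the list:
-- i += 2 after a "-e"/value pair, i += 1 otherwise, break when "-e" is last.
def pvBLoop (args : List String) (env : PySem.Dict String String) : PySem.Dict String String :=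
  match args with
  | [] => env
  | a :: rest =>
    if a == "-e" then
      match rest with
      | [] => env
      | v :: rest' =>
        let env :=
          if PySem.Str.isIn "=" v then
            match PySem.Str.splitMax? v "=" 1 with
            | some (key :: value :: _) => env.insert key (pvStripQuotes value)
            | _ => env
          else env
        pvBLoop rest' env
    else pvBLoop rest env

def extract_env_vars_py_alt (args : List String) : List (String × String) :=
  (pvBLoop args PySem.Dict.empty).items

-- ===== PRECONDITION & SPEC =====
-- A catches its own ValueError and is total: no Pre_ needed.
def Spec_extract_env_vars_py (args : List String) (out : List (String × String)) : Prop := out = extract_env_vars_py_alt args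
instance (args : List String) (out : List (String × String)) : Decidable (Spec_extract_env_vars_py args out) := by unfold Spec_extract_env_vars_py; infer_instance

-- ===== CLAIM (what is proved, stated in full; the proofs are below) =====
def Claim_equal_extract_env_vars_py : Prop := ∀ (args : List String), Dom_extract_env_vars_py args → Spec_extract_env_vars_py args (extract_env_vars_py args)

-- ===== LEMMAS AND PROOFS =====

theorem pvSliceDrop (xs : List String) (k : Nat) :
    PySem.List.slice xs (some ((k : Int))) none = xs.drop k :=
  PySem.List.slice_from_natCast (xs := xs) (a := k)

theorem pvASkip (a : String) (rest : List String) (env : PySem.Dict String String)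
    (ha : a ≠ "-e") : pvALoop (a :: rest) env = pvALoop rest env := by
  have hcons : PySem.List.index? (a :: rest) "-e" = (PySem.List.index? rest "-e").map (· + 1) :=
    PySem.List.index?_cons_of_ne rest ha
  cases hr : PySem.List.index? rest "-e" with
  | none =>
    rw [pvALoop, pvALoop, hcons, hr]
    rfl
  | some e =>
    rw [pvALoop, pvALoop, hcons, hr]
    simp only [Option.map_some, List.length_cons, List.getElem_cons_succ]
    by_cases hg : e + 1 < rest.length
    · rw [dif_pos (by omega), dif_pos hg]
      congr 1
      have h1 : (((e + 1 : Nat)) : Int) + 2 = (((e + 3 : Nat)) : Int) := by push_cast; try ring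
      have h2 : ((e : Int)) + 2 = (((e + 2 : Nat)) : Int) := by push_cast; try ring
      rw [h1, h2, pvSliceDrop, pvSliceDrop]
      rfl
    · rw [dif_neg (by omega), dif_neg hg]

theorem pvLoopEqAux : ∀ (n : Nat) (args : List String), args.length ≤ n →
    ∀ env, pvALoop args env = pvBLoop args env := by
  intro n
  induction n with
  | zero =>
    intro args h env
    have h0 : args = [] := List.eq_nil_of_length_eq_zero (Nat.le_zero.mp h)
    subst h0
    rw [pvALoop, pvBLoop]
    rfl
  | succ n ih =>
    intro args h env
    match args with
    | [] => rw [pvALoop, pvBLoop]; rfl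
    | a :: rest =>
      by_cases ha : a = "-e"
      · subst ha
        cases rest with
        | nil =>
          rw [pvALoop, pvBLoop, PySem.List.index?_cons_self]
          rfl
        | cons v rest' =>
          rw [pvALoop, pvBLoop, PySem.List.index?_cons_self]
          simp only [List.length_cons, List.getElem_cons_succ, List.getElem_cons_zero,
            beq_self_eq_true, if_true]
          rw [dif_pos (by omega)]
          have hs : PySem.List.slice ("-e" :: v :: rest') (some (((0 : Nat) : Int) + 2)) none = rest' := by
            have h2 : (((0 : Nat) : Int)) + 2 = (((2 : Nat)) : Int) := by push_cast; try ring
            rw [h2, pvSliceDrop]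
            rfl
          rw [hs]
          rw [ih rest' (by simp at h; omega)]
          simp only [pvStripQuotes]
      · rw [pvASkip a rest env ha]
        have hb : pvBLoop (a :: rest) env = pvBLoop rest env := by
          rw [pvBLoop.eq_def]
          simp [ha]
        rw [hb]
        exact ih rest (by simp at h; omega) env

-- ===== VERDICT (by name: the statement is the Claim_ definition above) =====
theorem extract_env_vars_py_spec : Claim_equal_extract_env_vars_py := by
  intro args _
  unfold Spec_extract_env_vars_py extract_env_vars_py extract_env_vars_py_alt
  rw [pvLoopEqAux args.length args le_rfl]
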